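-- pv_equiv track=rewrite | github.com/bravojuandb/python-daily-drills | pillar2/foundational_algorithms/group_transactions_by_customer.py | aggregate_sums_and_counts
-- ===== SOURCE A (Python) =====
-- def aggregate_sums_and_counts(
--     pairs: list[tuple[str, int]]
-- ) -> tuple[dict[str, int], dict[str, int]]:
--     """Compute per-student sum and count using .get()."""
--     sums: dict[str, int] = {}
--     counts: dict[str, int] = {}
--
--     for student, score in pairs:
--         sums[student] = sums.get(student, 0) + score
--         counts[student] = counts.get(student, 0) + 1
--
--     return sums, counts
-- ===== SOURCE B (Python) =====
-- def aggregate_sums_and_counts(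
--     pairs: list[tuple[str, int]]
-- ) -> tuple[dict[str, int], dict[str, int]]:
--     """Group scores per student first, then derive both aggregates from the groups."""
--     groups: dict[str, list[int]] = {}
--     for student, score in pairs:
--         groups.setdefault(student, []).append(score)
--     sums = {student: sum(scores) for student, scores in groups.items()}
--     counts = {student: len(scores) for student, scores in groups.items()}
--     return sums, counts
-- ===== Notes on version B (the rewrite author's own statement) =====
-- stated objective: alternative
-- what changed: Instead of updating two running dicts key-by-key in one scan, B builds a single dict of per-student score lists and then derives the sums and counts dicts from those groups by two comprehensions.
import Mathlib
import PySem

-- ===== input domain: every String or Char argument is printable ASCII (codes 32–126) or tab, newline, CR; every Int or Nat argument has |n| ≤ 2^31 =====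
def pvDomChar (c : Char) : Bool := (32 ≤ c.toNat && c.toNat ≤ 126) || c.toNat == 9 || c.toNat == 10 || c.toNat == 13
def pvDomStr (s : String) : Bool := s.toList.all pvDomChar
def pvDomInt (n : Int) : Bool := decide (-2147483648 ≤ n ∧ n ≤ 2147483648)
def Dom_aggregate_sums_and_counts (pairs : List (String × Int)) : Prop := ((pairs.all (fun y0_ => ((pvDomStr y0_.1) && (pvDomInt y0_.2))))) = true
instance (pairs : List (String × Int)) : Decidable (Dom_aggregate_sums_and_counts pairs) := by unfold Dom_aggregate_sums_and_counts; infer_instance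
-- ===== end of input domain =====

-- B groups scores per student into one dict of lists and then derives the sums and counts
-- dicts from the groups, instead of A's key-by-key updates of two running dicts (alternative decomposition).


-- ===== PORT A =====
def aggregate_sums_and_counts (pairs : List (String × Int)) : (List (String × Int)) × (List (String × Int)) :=
  let sc := pairs.foldl
    (fun sc p => (sc.1.insert p.1 (sc.1.getD p.1 0 + p.2), sc.2.insert p.1 (sc.2.getD p.1 0 + 1)))
    ((PySem.Dict.empty : PySem.Dict String Int), (PySem.Dict.empty : PySem.Dict String Int))
  (sc.1.items, sc.2.items)

-- ===== PORT B =====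
def aggregate_sums_and_counts_alt (pairs : List (String × Int)) : (List (String × Int)) × (List (String × Int)) :=
  let groups : PySem.Dict String (List Int) :=
    pairs.foldl (fun d p => d.modify p.1 [] (· ++ [p.2])) PySem.Dict.empty
  (groups.items.map (fun p => (p.1, p.2.sum)),
   groups.items.map (fun p => (p.1, (p.2.length : Int))))

-- ===== PRECONDITION & SPEC =====
def Spec_aggregate_sums_and_counts (pairs : List (String × Int)) (out : (List (String × Int)) × (List (String × Int))) : Prop := out = aggregate_sums_and_counts_alt pairs
instance (pairs : List (String × Int)) (out : (List (String × Int)) × (List (String × Int))) : Decidable (Spec_aggregate_sums_and_counts pairs out) := by unfold Spec_aggregate_sums_and_counts; infer_instance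

-- ===== CLAIM (what is proved, stated in full; the proofs are below) =====
def Claim_equal_aggregate_sums_and_counts : Prop := ∀ (pairs : List (String × Int)), Dom_aggregate_sums_and_counts pairs → Spec_aggregate_sums_and_counts pairs (aggregate_sums_and_counts pairs)

-- ===== LEMMAS AND PROOFS =====

-- A's joint fold over the (sums, counts) pair computes its two independent folds componentwise.
theorem pvFoldPair (pairs : List (String × Int))
    (s c : PySem.Dict String Int) :
    pairs.foldl
      (fun sc p => (sc.1.insert p.1 (sc.1.getD p.1 0 + p.2), sc.2.insert p.1 (sc.2.getD p.1 0 + 1)))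
      (s, c)
    = (pairs.foldl (fun s p => s.insert p.1 (s.getD p.1 0 + p.2)) s,
       pairs.foldl (fun c p => c.insert p.1 (c.getD p.1 0 + 1)) c) := by
  induction pairs generalizing s c with
  | nil => rfl
  | cons p t ih => simpa [List.foldl] using ih _ _

-- lookup through the item-wise image of a dict of groups
theorem pvGetRel (f : List Int → Int)
    (g : PySem.Dict String (List Int)) (s : PySem.Dict String Int)
    (hs : s.items = g.items.map (fun p => (p.1, f p.2))) (k : String) :
    s.get? k = (g.get? k).map f := by
  simp only [PySem.Dict.get?, hs, List.find?_map, Option.map_map]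
  rfl

-- one A-side insert matches one B-side group update through the image
theorem pvInsertRel (f : List Int → Int) (hf0 : f [] = 0)
    (g : PySem.Dict String (List Int)) (s : PySem.Dict String Int)
    (hs : s.items = g.items.map (fun p => (p.1, f p.2))) (k : String) (v : Int) :
    (s.insert k (s.getD k 0 + (f (g.getD k [] ++ [v]) - f (g.getD k [])))).items
    = (g.insert k (g.getD k [] ++ [v])).items.map (fun p => (p.1, f p.2)) := by
  have hget := pvGetRel f g s hs k
  have hcont : s.contains k = g.contains k := by
    rw [PySem.Dict.contains_eq_isSome_get?, PySem.Dict.contains_eq_isSome_get?, hget]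
    cases g.get? k <;> rfl
  have hval : s.getD k 0 + (f (g.getD k [] ++ [v]) - f (g.getD k [])) = f (g.getD k [] ++ [v]) := by
    simp only [PySem.Dict.getD, hget]
    cases g.get? k <;> simp [hf0]
  rw [hval, PySem.Dict.items_insert, PySem.Dict.items_insert, hcont]
  by_cases h : g.contains k = true
  · simp only [h, if_pos, hs, List.map_map]
    apply List.map_congr_left
    intro p _
    by_cases hk : (p.1 == k) = true <;> simp [Function.comp, hk]
  · simp [h, hs]

-- main invariant: the two folds stay related through the item-wise image
theorem pvLoopRel' (f : List Int → Int) (hf0 : f [] = 0)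
    (w : Int → Int) (hfa : ∀ l v, f (l ++ [v]) = f l + w v)
    (pairs : List (String × Int))
    (g : PySem.Dict String (List Int)) (s : PySem.Dict String Int)
    (hs : s.items = g.items.map (fun p => (p.1, f p.2))) :
    (pairs.foldl (fun s p => s.insert p.1 (s.getD p.1 0 + w p.2)) s).items
    = (pairs.foldl (fun d p => d.modify p.1 [] (· ++ [p.2])) g).items.map (fun p => (p.1, f p.2)) := by
  induction pairs generalizing g s with
  | nil => simpa using hs
  | cons p t ih =>
    simp only [List.foldl]
    apply ih
    have h := pvInsertRel f hf0 g s hs p.1 p.2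
    have hw : s.getD p.1 0 + w p.2
        = s.getD p.1 0 + (f (g.getD p.1 [] ++ [p.2]) - f (g.getD p.1 [])) := by
      rw [hfa]; ring
    rw [hw, PySem.Dict.modify]
    exact h

-- ===== VERDICT (by name: the statement is the Claim_ definition above) =====
theorem aggregate_sums_and_counts_spec : Claim_equal_aggregate_sums_and_counts := by
  intro pairs _
  unfold Spec_aggregate_sums_and_counts aggregate_sums_and_counts aggregate_sums_and_counts_alt
  rw [pvFoldPair]
  refine Prod.ext ?_ ?_
  · exact pvLoopRel' (fun l => l.sum) rfl id (by intro l v; simp) pairs PySem.Dict.empty PySem.Dict.empty rfl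
  · exact pvLoopRel' (fun l => (l.length : Int)) rfl (fun _ => 1) (by intro l v; simp) pairs PySem.Dict.empty PySem.Dict.empty rfl
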